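-- pv_equiv track=rewrite | github.com/loredeluca/Social-Distancing-Measure | socialDistance/utils.py | compare_vect
-- ===== SOURCE A (Python) =====
-- def compare_vect(v1,v2):
--     #compare the elements of two vectors and check if they are equal
--     for i in range(len(v1)):
--         for j in range(len(v2)):
--             if(i == j):
--                 for k in range(len(v1[i])):
--                     for l in range(len(v2[j])):
--                         if k == l:
--                             if v1[i][k] != v2[j][l]:
--                                 return False
--     return True
-- ===== SOURCE B (Python) =====
-- def compare_vect(v1, v2):
--     return all(a == b for r1, r2 in zip(v1, v2) for a, b in zip(r1, r2))
-- ===== Notes on version B (the rewrite author's own statement) =====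
-- stated objective: faster
-- what changed: Replaced the four nested index loops (with i==j / k==l filters) by a single pass over zip(v1,v2) and zip of paired rows, comparing only matching indices directly.
import Mathlib
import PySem

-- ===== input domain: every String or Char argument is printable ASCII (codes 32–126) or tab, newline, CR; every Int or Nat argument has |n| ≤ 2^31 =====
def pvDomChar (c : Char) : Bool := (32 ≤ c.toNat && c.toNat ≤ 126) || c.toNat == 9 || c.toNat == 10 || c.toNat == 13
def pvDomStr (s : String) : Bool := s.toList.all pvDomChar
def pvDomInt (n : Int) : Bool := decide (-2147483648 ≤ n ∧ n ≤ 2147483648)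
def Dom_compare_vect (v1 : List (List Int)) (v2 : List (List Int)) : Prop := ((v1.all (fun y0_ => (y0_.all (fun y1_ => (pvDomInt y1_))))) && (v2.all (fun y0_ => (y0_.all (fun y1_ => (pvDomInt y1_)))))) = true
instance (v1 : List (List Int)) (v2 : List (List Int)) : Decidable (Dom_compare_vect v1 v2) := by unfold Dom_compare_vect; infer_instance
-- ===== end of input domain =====

-- B replaces A's four nested index loops (guarded by i==j / k==l) with a single
-- pass zipping the two vectors and their paired rows (objective: faster).

-- ===== PORT A =====
-- A's nested `for … in range(…)` loops with an early `return False` are ported as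
-- nested `.all` over index ranges: the Bool value is identical (False iff some
-- guarded comparison fails). Indices are always in range, so `getD` never defaults.
def compare_vect (v1 : List (List Int)) (v2 : List (List Int)) : Bool :=
  (List.range v1.length).all fun i =>
    (List.range v2.length).all fun j =>
      if i = j then
        (List.range (v1.getD i []).length).all fun k =>
          (List.range (v2.getD j []).length).all fun l =>
            if k = l then (v1.getD i []).getD k 0 == (v2.getD j []).getD l 0
            else true
      else true

-- ===== PORT B =====
def compare_vect_alt (v1 : List (List Int)) (v2 : List (List Int)) : Bool :=
  (v1.zip v2).all fun p => (p.1.zip p.2).all fun q => q.1 == q.2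

-- ===== PRECONDITION & SPEC =====
def Spec_compare_vect (v1 : List (List Int)) (v2 : List (List Int)) (out : Bool) : Prop := out = compare_vect_alt v1 v2
instance (v1 : List (List Int)) (v2 : List (List Int)) (out : Bool) : Decidable (Spec_compare_vect v1 v2 out) := by unfold Spec_compare_vect; infer_instance

-- ===== CLAIM (what is proved, stated in full; the proofs are below) =====
def Claim_equal_compare_vect : Prop := ∀ (v1 : List (List Int)) (v2 : List (List Int)), Dom_compare_vect v1 v2 → Spec_compare_vect v1 v2 (compare_vect v1 v2)

-- ===== LEMMAS AND PROOFS =====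

-- The inner range-loop with an `i = j` guard tests only the diagonal.
theorem diag_all (n m : Nat) (P : Nat → Nat → Bool) :
    ((List.range n).all fun i => (List.range m).all fun j => if i = j then P i j else true)
      = ((List.range (min n m)).all fun i => P i i) := by
  rcases Bool.eq_false_or_eq_true ((List.range (min n m)).all fun i => P i i) with h | h <;>
    rw [h]
  · rw [List.all_eq_true] at h
    rw [List.all_eq_true]
    intro i hi
    rw [List.all_eq_true]
    intro j hj
    split
    · next heq =>
      subst heq
      exact h i (by simp at hi hj ⊢; omega)
    · rfl
  · rw [List.all_eq_false] at h
    obtain ⟨i, hi, hPi⟩ := h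
    rw [List.mem_range] at hi
    rw [List.all_eq_false]
    refine ⟨i, by simp; omega, ?_⟩
    rw [Bool.not_eq_true, List.all_eq_false]
    refine ⟨i, by simp; omega, ?_⟩
    simpa using hPi

-- A range-loop over min-length indices reading both lists is a loop over their zip.
theorem range_min_all_eq_zip_all {α : Type} (Q : α → α → Bool) (d : α) :
    ∀ (xs ys : List α),
      ((List.range (min xs.length ys.length)).all fun i => Q (xs.getD i d) (ys.getD i d))
        = ((xs.zip ys).all fun p => Q p.1 p.2) := by
  intro xs
  induction xs with
  | nil => intro ys; simp
  | cons x xs ih =>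
    intro ys
    cases ys with
    | nil => simp
    | cons y ys =>
      have : min (x :: xs).length (y :: ys).length = min xs.length ys.length + 1 := by
        simp [Nat.succ_min_succ]
      rw [this, List.range_succ_eq_map]
      simp only [List.all_cons, List.all_map, List.zip_cons_cons, Function.comp_def,
        List.getD_cons_zero, List.getD_cons_succ]
      rw [ih ys]

theorem compare_eq (v1 v2 : List (List Int)) :
    compare_vect v1 v2 = compare_vect_alt v1 v2 := by
  unfold compare_vect compare_vect_alt
  rw [diag_all]
  have hrow : ∀ r1 r2 : List Int,
      ((List.range r1.length).all fun k =>
        (List.range r2.length).all fun l => if k = l then r1.getD k 0 == r2.getD l 0 else true)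
        = ((r1.zip r2).all fun q => q.1 == q.2) := by
    intro r1 r2
    rw [diag_all (P := fun k l => r1.getD k 0 == r2.getD l 0)]
    exact range_min_all_eq_zip_all (fun a b => a == b) 0 r1 r2
  calc ((List.range (min v1.length v2.length)).all fun i =>
          (List.range (v1.getD i []).length).all fun k =>
            (List.range (v2.getD i []).length).all fun l =>
              if k = l then (v1.getD i []).getD k 0 == (v2.getD i []).getD l 0 else true)
      = ((List.range (min v1.length v2.length)).all fun i =>
          ((v1.getD i []).zip (v2.getD i [])).all fun q => q.1 == q.2) := by
        simp only [hrow]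
    _ = _ := range_min_all_eq_zip_all (fun r1 r2 => (r1.zip r2).all fun q => q.1 == q.2) [] v1 v2

-- ===== VERDICT (by name: the statement is the Claim_ definition above) =====
theorem compare_vect_spec : Claim_equal_compare_vect := by
  intro v1 v2 _
  exact compare_eq v1 v2
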